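-- pv_equiv track=rewrite | github.com/Wahab440/Implementing_Graph_Algorithms- | Graph.py | dfs
-- ===== SOURCE A (Python) =====
-- graph = {
--     "S": [("B_top", 2), ("C", 4), ("B_bottom", 4)],
--     "B_top": [("G", 5), ("C", 5)],
--     "B_bottom": [("C", 1)],
--     "C": [("G", 3), ("F", 3), ("G", 2)],
--     "E": [("B_bottom", 4)],
--     "F": [("B_bottom", 1)],
--     "G": [("C", 2)]
-- }
--
-- def dfs(start, goal):
--     stack = [(start, [start])]
--     visited = set()
--     expanded = 0
--     while stack:
--         node, path = stack.pop()
--         if node in visited: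
--             continue
--         visited.add(node)
--         expanded += 1
--         if node == goal:
--             return path, expanded
--         for n, _ in reversed(graph[node]):
--             if n not in visited:
--                 stack.append((n, path + [n]))
--     return None, expanded
-- ===== SOURCE B (Python) =====
-- graph = {
--     "S": [("B_top", 2), ("C", 4), ("B_bottom", 4)],
--     "B_top": [("G", 5), ("C", 5)],
--     "B_bottom": [("C", 1)],
--     "C": [("G", 3), ("F", 3), ("G", 2)],
--     "E": [("B_bottom", 4)],
--     "F": [("B_bottom", 1)],
--     "G": [("C", 2)]
-- }
--
-- def dfs(start, goal):
--     visited = set()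
--     expanded = 0
--
--     def rec(node, path):
--         nonlocal expanded
--         if node in visited:
--             return None
--         visited.add(node)
--         expanded += 1
--         if node == goal:
--             return path
--         for n, _ in graph[node]:
--             if n not in visited:
--                 res = rec(n, path + [n])
--                 if res is not None:
--                     return res
--         return None
--
--     return rec(start, [start]), expanded
-- ===== Notes on version B (the rewrite author's own statement) =====
-- stated objective: alternative
-- what changed: Replaces A's explicit stack simulation (pushing neighbors reversed and checking visited at pop time) with direct recursive DFS over the original neighbor order, threading a visited set and an expanded counter through a helper that returns the first goal path found.
import Mathlib
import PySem

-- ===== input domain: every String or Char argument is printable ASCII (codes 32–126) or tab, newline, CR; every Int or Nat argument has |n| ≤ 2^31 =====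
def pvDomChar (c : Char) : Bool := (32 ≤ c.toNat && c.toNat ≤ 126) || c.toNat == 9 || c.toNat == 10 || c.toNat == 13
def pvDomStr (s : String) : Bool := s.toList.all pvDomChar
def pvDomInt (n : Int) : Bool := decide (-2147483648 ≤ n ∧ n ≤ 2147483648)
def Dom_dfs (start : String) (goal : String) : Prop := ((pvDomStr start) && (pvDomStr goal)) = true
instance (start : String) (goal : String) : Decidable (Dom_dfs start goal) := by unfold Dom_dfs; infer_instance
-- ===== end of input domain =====

-- B replaces A's explicit stack simulation (with reversed pushes) by direct recursive DFS
-- threading the visited set and expansion counter; same result, different decomposition.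

-- the module-level `graph` constant
def pyGraph : PySem.Dict String (List (String × Int)) :=
  PySem.Dict.ofList [("S", [("B_top", 2), ("C", 4), ("B_bottom", 4)]),
   ("B_top", [("G", 5), ("C", 5)]),
   ("B_bottom", [("C", 1)]),
   ("C", [("G", 3), ("F", 3), ("G", 2)]),
   ("E", [("B_bottom", 4)]),
   ("F", [("B_bottom", 1)]),
   ("G", [("C", 2)])]

-- ===== PORT A =====
-- A's `while stack:` loop; fuel is only a totality guard (the loop provably runs ≤ a few
-- dozen iterations on the fixed 7-node graph, so 1000 is never exhausted inside Pre_).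
-- The stack is kept head-as-top; `for n,_ in reversed(graph[node]): stack.append(…)` becomes
-- the foldl over the reversed neighbour list prepending each kept entry, which yields exactly
-- Python's post-push stack. `graph[node]` raises KeyError for a missing key; Pre_dfs excludes
-- those inputs, so `getD node []` is only taken on keys there.
def dfsLoop (goal : String) (fuel : Nat) (stack : List (String × List String))
    (visited : PySem.Set String) (expanded : Int) : Option (List String) × Int :=
  match fuel with
  | 0 => (none, expanded)
  | fuel + 1 =>
    match stack with
    | [] => (none, expanded)
    | (node, path) :: rest =>
      if visited.contains node then
        dfsLoop goal fuel rest visited expanded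
      else
        let visited := visited.add node
        let expanded := expanded + 1
        if node == goal then (some path, expanded)
        else
          dfsLoop goal fuel
            ((pyGraph.getD node []).reverse.foldl
              (fun st p => if visited.contains p.1 then st else (p.1, path ++ [p.1]) :: st) rest)
            visited expanded

def dfs (start : String) (goal : String) : Option (List String) × Int :=
  dfsLoop goal 1000 [(start, [start])] (PySem.Set.ofList []) 0

-- ===== PORT B =====
-- B's closure `rec(node, path)` with mutable `visited`/`expanded`: ported by threading that
-- state through; fuel bounds the recursion DEPTH only (a totality guard, never exhausted).
mutual
  def dfsRec (goal : String) (fuel : Nat) (node : String) (path : List String)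
      (visited : PySem.Set String) (expanded : Int) :
      Option (List String) × PySem.Set String × Int :=
    match fuel with
    | 0 => (none, visited, expanded)
    | fuel + 1 =>
      if visited.contains node then (none, visited, expanded)
      else
        let visited := visited.add node
        let expanded := expanded + 1
        if node == goal then (some path, visited, expanded)
        else dfsChildren goal fuel (pyGraph.getD node []) path visited expanded

  def dfsChildren (goal : String) (fuel : Nat) (nbrs : List (String × Int)) (path : List String)
      (visited : PySem.Set String) (expanded : Int) :
      Option (List String) × PySem.Set String × Int :=
    match fuel with
    | 0 => (none, visited, expanded)
    | fuel + 1 =>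
      match nbrs with
      | [] => (none, visited, expanded)
      | (n, _) :: rest =>
        if visited.contains n then dfsChildren goal fuel rest path visited expanded
        else
          match dfsRec goal fuel n (path ++ [n]) visited expanded with
          | (some res, visited', expanded') => (some res, visited', expanded')
          | (none, visited', expanded') => dfsChildren goal fuel rest path visited' expanded'
end

def dfs_alt (start : String) (goal : String) : Option (List String) × Int :=
  match dfsRec goal 1000 start [start] (PySem.Set.ofList []) 0 with
  | (res, _, expanded) => (res, expanded)

-- ===== PRECONDITION & SPEC =====
-- Pre_ excludes exactly the inputs where `graph[start]` raises KeyError in A (start not a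
-- graph key and start ≠ goal); B raises the same KeyError there.
def Pre_dfs (start : String) (goal : String) : Prop :=
  start ∈ ["S", "B_top", "B_bottom", "C", "E", "F", "G"] ∨ start = goal
instance (start : String) (goal : String) : Decidable (Pre_dfs start goal) := by
  unfold Pre_dfs; infer_instance

def pvWitness_dfs : String × String := ("S", "G")

def Spec_dfs (start : String) (goal : String) (out : Option (List String) × Int) : Prop := out = dfs_alt start goal
instance (start : String) (goal : String) (out : Option (List String) × Int) : Decidable (Spec_dfs start goal out) := by unfold Spec_dfs; infer_instance

-- ===== CLAIM (what is proved, stated in full; the proofs are below) =====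
def Claim_equal_dfs : Prop := ∀ (start : String) (goal : String), Dom_dfs start goal → Pre_dfs start goal → Spec_dfs start goal (dfs start goal)

-- ===== LEMMAS AND PROOFS =====

def pvNames : List String := ["S", "B_top", "B_bottom", "C", "E", "F", "G"]

-- every neighbour name occurring in the graph (under a node name) is again a node name
theorem pvGraph_closed (node : String) (hn : node ∈ pvNames) (q : String × Int)
    (hq : q ∈ pyGraph.getD node []) : q.1 ∈ pvNames := by
  have hall : pvNames.all
      (fun node => (pyGraph.getD node []).all (fun q => decide (q.1 ∈ pvNames))) = true := by
    decide
  exact of_decide_eq_true (List.all_eq_true.mp (List.all_eq_true.mp hall node hn) q hq)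

-- elements of the push-fold are either old stack entries or pushed neighbours
theorem pvFold_mem (l : List (String × Int)) (st : List (String × List String))
    (c : String × Int → Bool) (f : String × Int → String × List String) (x : String × List String)
    (hx : x ∈ l.foldl (fun st p => if c p then st else f p :: st) st) :
    x ∈ st ∨ ∃ p ∈ l, x = f p := by
  induction l generalizing st with
  | nil => exact Or.inl hx
  | cons q l ih =>
    simp only [List.foldl_cons] at hx
    rcases ih _ hx with h | ⟨p, hp, hfp⟩
    · by_cases hc : c q = true
      · simp only [hc, if_true] at h; exact Or.inl h
      · simp only [hc, Bool.false_eq_true, if_false, List.mem_cons] at h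
        rcases h with h | h
        · exact Or.inr ⟨q, List.mem_cons_self .., h⟩
        · exact Or.inl h
    · exact Or.inr ⟨p, List.mem_cons_of_mem _ hp, hfp⟩

-- congruence: if the goal string is not a node name, A's loop does not depend on it
theorem pvLoop_cong (g g' : String) (hg : g ∉ pvNames) (hg' : g' ∉ pvNames) :
    ∀ fuel stack (vis : PySem.Set String) (exp : Int),
      (∀ p ∈ stack, (p : String × List String).1 ∈ pvNames) →
      dfsLoop g fuel stack vis exp = dfsLoop g' fuel stack vis exp := by
  intro fuel
  induction fuel with
  | zero => intro stack vis exp _; rfl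
  | succ fuel ih =>
    intro stack vis exp hstack
    match stack with
    | [] => rfl
    | (node, path) :: rest =>
      have hnode : node ∈ pvNames := hstack (node, path) (List.mem_cons_self ..)
      have hrest : ∀ p ∈ rest, (p : String × List String).1 ∈ pvNames :=
        fun p hp => hstack p (List.mem_cons_of_mem _ hp)
      have hbg : ¬((node == g) = true) := by
        simp only [beq_iff_eq]; exact fun h => hg (h ▸ hnode)
      have hbg' : ¬((node == g') = true) := by
        simp only [beq_iff_eq]; exact fun h => hg' (h ▸ hnode)
      by_cases hv : vis.contains node = true
      · simp only [dfsLoop]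
        rw [if_pos hv, if_pos hv]
        exact ih rest vis exp hrest
      · simp only [dfsLoop]
        rw [if_neg hv, if_neg hv, if_neg hbg, if_neg hbg']
        apply ih
        intro p hp
        rcases pvFold_mem _ _ _ _ _ hp with h | ⟨q, hq, hfq⟩
        · exact hrest p h
        · rw [hfq]; exact pvGraph_closed node hnode q (List.mem_reverse.mp hq)

-- congruence for B's recursion: joint statement for the mutual pair
theorem pvRec_cong (g g' : String) (hg : g ∉ pvNames) (hg' : g' ∉ pvNames) :
    ∀ fuel,
      (∀ node path (vis : PySem.Set String) (exp : Int), node ∈ pvNames →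
        dfsRec g fuel node path vis exp = dfsRec g' fuel node path vis exp) ∧
      (∀ nbrs path (vis : PySem.Set String) (exp : Int),
        (∀ q ∈ nbrs, (q : String × Int).1 ∈ pvNames) →
        dfsChildren g fuel nbrs path vis exp = dfsChildren g' fuel nbrs path vis exp) := by
  intro fuel
  induction fuel with
  | zero => exact ⟨fun _ _ _ _ _ => rfl, fun _ _ _ _ _ => rfl⟩
  | succ fuel ih =>
    obtain ⟨ihRec, ihCh⟩ := ih
    constructor
    · intro node path vis exp hnode
      have hbg : ¬((node == g) = true) := by
        simp only [beq_iff_eq]; exact fun h => hg (h ▸ hnode)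
      have hbg' : ¬((node == g') = true) := by
        simp only [beq_iff_eq]; exact fun h => hg' (h ▸ hnode)
      by_cases hv : vis.contains node = true
      · simp only [dfsRec]
        rw [if_pos hv, if_pos hv]
      · simp only [dfsRec]
        rw [if_neg hv, if_neg hv, if_neg hbg, if_neg hbg']
        exact ihCh _ _ _ _ (fun q hq => pvGraph_closed node hnode q hq)
    · intro nbrs
      induction nbrs with
      | nil => intro path vis exp _; rfl
      | cons q rest ihl =>
        intro path vis exp hn
        have hq : q.1 ∈ pvNames := hn q (List.mem_cons_self ..)
        have hrest : ∀ r ∈ rest, (r : String × Int).1 ∈ pvNames :=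
          fun r hr => hn r (List.mem_cons_of_mem _ hr)
        obtain ⟨n, w⟩ := q
        by_cases hv : vis.contains n = true
        · simp only [dfsChildren]
          rw [if_pos hv, if_pos hv]
          exact ihCh rest path vis exp hrest
        · simp only [dfsChildren]
          rw [if_neg hv, if_neg hv, ihRec n (path ++ [n]) vis exp hq]
          rcases hres : dfsRec g' fuel n (path ++ [n]) vis exp with ⟨res, vis1, exp1⟩
          cases res with
          | some r => rfl
          | none => exact ihCh rest path vis1 exp1 hrest

-- fully concrete agreement at goal "%" (a string that is not a node name)
theorem pvAgree_concrete (start : String) (hs : start ∈ pvNames) :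
    dfs start "%" = dfs_alt start "%" := by
  fin_cases hs <;> decide

-- concrete agreement for all 49 pairs of node names
theorem pvAgree_in (start goal : String) (hs : start ∈ pvNames) (hgo : goal ∈ pvNames) :
    dfs start goal = dfs_alt start goal := by
  fin_cases hs <;> fin_cases hgo <;> decide

-- ===== VERDICT (by name: the statement is the Claim_ definition above) =====
theorem dfs_spec : Claim_equal_dfs := by
  intro start goal _ hpre
  unfold Spec_dfs
  by_cases hs : start ∈ pvNames
  · by_cases hgo : goal ∈ pvNames
    · exact pvAgree_in start goal hs hgo
    · have hpc : ("%" : String) ∉ pvNames := by decide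
      have hstack : ∀ p ∈ [(start, [start])], (p : String × List String).1 ∈ pvNames := by
        intro p hp
        rw [List.mem_singleton] at hp
        rw [hp]
        exact hs
      calc dfs start goal
          = dfs start "%" := pvLoop_cong goal "%" hgo hpc 1000 _ _ _ hstack
        _ = dfs_alt start "%" := pvAgree_concrete start hs
        _ = dfs_alt start goal := by
            unfold dfs_alt
            rw [(pvRec_cong "%" goal hpc hgo 1000).1 start [start] _ 0 hs]
  · have hsg : start = goal := by
      rcases hpre with h | h
      · exact absurd (by simpa [pvNames] using h) hs
      · exact h
    subst hsg
    unfold dfs dfs_alt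
    rw [show (1000 : Nat) = 999 + 1 from rfl]
    simp [dfsLoop, dfsRec, PySem.Set.ofList]
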